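-- pv_equiv track=rewrite | github.com/HeinleinSupport/check_mk_extensions | memcached/lib/check_mk/base/plugins/agent_based/memcached.py | parse_memcached
-- ===== SOURCE A (Python) =====
-- def parse_memcached(string_table):
--     instances = {}
--     current_instance = None
--     for line in string_table:
--         if not line:
--             continue
--
--         if line[0].startswith("["):
--             current_instance = line[0].strip("[]")
--             instances[current_instance] = {}
--         elif current_instance is None:
--             raise Exception("expected instance name")
--         else:
--             instances[current_instance][line[0]] = line[1]
--     return instances
-- ===== SOURCE B (Python) =====
-- def parse_memcached(string_table):
--     lines = [l for l in string_table if l]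
--     if lines and not lines[0][0].startswith("["):
--         raise Exception("expected instance name")
--     instances = {}
--     i = 0
--     n = len(lines)
--     while i < n:
--         name = lines[i][0].strip("[]")
--         j = i + 1
--         while j < n and not lines[j][0].startswith("["):
--             j += 1
--         instances[name] = {l[0]: l[1] for l in lines[i + 1:j]}
--         i = j
--     return instances
-- ===== Notes on version B (the rewrite author's own statement) =====
-- stated objective: alternative
-- what changed: A is a single stateful pass over the lines with a mutable current_instance dict target; B first drops empty lines, then cuts the list into header-delimited segments and builds each instance's dict from its whole segment at once via a comprehension.
import Mathlib
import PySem

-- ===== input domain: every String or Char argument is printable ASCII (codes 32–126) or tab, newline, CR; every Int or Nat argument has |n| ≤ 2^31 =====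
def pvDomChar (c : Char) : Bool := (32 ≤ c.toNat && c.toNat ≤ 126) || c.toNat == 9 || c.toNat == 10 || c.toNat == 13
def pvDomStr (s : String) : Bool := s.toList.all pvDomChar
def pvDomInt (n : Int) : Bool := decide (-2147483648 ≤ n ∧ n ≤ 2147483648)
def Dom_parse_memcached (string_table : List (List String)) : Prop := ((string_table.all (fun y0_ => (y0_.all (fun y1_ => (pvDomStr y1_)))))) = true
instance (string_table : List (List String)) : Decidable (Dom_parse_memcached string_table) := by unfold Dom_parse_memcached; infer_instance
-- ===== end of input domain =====

-- B replaces A's single stateful pass (mutable current_instance) by a two-level decomposition: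
-- filter out empty lines, then cut the list into header-delimited segments and build each
-- instance's dict from its whole segment at once (objective: alternative decomposition).

-- ===== PORT A =====
-- one iteration of A's for-loop; state = (instances, current_instance)
def pvStepA (s : PySem.Dict String (PySem.Dict String String) × Option String)
    (line : List String) : PySem.Dict String (PySem.Dict String String) × Option String :=
  match line with
  | [] => s                          -- 'if not line: continue'
  | w :: rest =>
    if PySem.Str.startswith w "[" then
      let name := PySem.Str.stripChars w "[]"
      (s.1.insert name PySem.Dict.empty, some name)
    else
      match s.2 with
      | none => s                    -- Python raises Exception here; excluded by Pre_
      | some cur =>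
          -- instances[current][line[0]] = line[1]; line[1] raises IndexError if absent (excluded by Pre_)
          (s.1.modify cur PySem.Dict.empty
            (fun d => d.insert w (PySem.List.pyGetD (w :: rest) 1 "")), some cur)

def parse_memcached (string_table : List (List String)) : List (String × List (String × String)) :=
  ((string_table.foldl pvStepA (PySem.Dict.empty, none)).1).items.map (fun p => (p.1, p.2.items))

-- ===== PORT B =====
-- inner while loop of Source B: split off the maximal run of non-header lines, return (body, rest)
def pvSegAlt : List (List String) → List (List String) × List (List String)
  | [] => ([], [])
  | l :: t =>
    if PySem.Str.startswith (l.headD "") "[" then ([], l :: t)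
    else
      let p := pvSegAlt t
      (l :: p.1, p.2)

-- termination measure for the outer while loop (cited by pvBuildAlt's decreasing_by)
theorem pvSegAlt_snd_length_le : ∀ t : List (List String), (pvSegAlt t).2.length ≤ t.length := by
  intro t
  induction t with
  | nil => simp [pvSegAlt]
  | cons l t ih =>
    simp only [pvSegAlt]
    split
    · simp
    · simpa using Nat.le_succ_of_le ih

-- outer while loop of Source B: lines starts with a header; consume one segment per step
def pvBuildAlt : List (List String) → PySem.Dict String (PySem.Dict String String) →
    PySem.Dict String (PySem.Dict String String)
  | [], acc => acc
  | l :: t, acc =>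
    pvBuildAlt (pvSegAlt t).2
      (acc.insert (PySem.Str.stripChars (l.headD "") "[]")
        (PySem.Dict.ofList ((pvSegAlt t).1.map (fun b => (b.headD "", PySem.List.pyGetD b 1 "")))))
termination_by l _ => l.length
decreasing_by exact Nat.lt_succ_of_le (pvSegAlt_snd_length_le t)

def parse_memcached_alt (string_table : List (List String)) : List (String × List (String × String)) :=
  let lines := string_table.filter (fun l => !l.isEmpty)
  (pvBuildAlt lines PySem.Dict.empty).items.map (fun p => (p.1, p.2.items))

-- ===== PRECONDITION & SPEC =====
-- Pre_ excludes exactly the inputs where Python A raises: a non-empty line before the first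
-- header (Exception "expected instance name") and a non-header line of length 1 (IndexError on line[1]).
def Pre_parse_memcached (string_table : List (List String)) : Prop :=
  (((string_table.filter (fun l => !l.isEmpty)).head?.all
      (fun l => PySem.Str.startswith (l.headD "") "[")) &&
   ((string_table.filter (fun l => !l.isEmpty)).all
      (fun l => PySem.Str.startswith (l.headD "") "[" || decide (2 ≤ l.length)))) = true
instance (string_table : List (List String)) : Decidable (Pre_parse_memcached string_table) := by
  unfold Pre_parse_memcached; infer_instance

def pvWitness_parse_memcached : List (List String) :=
  [["[foo]"], ["pid", "123"], [], ["[bar]"], ["uptime", "4"]]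

def Spec_parse_memcached (string_table : List (List String)) (out : List (String × List (String × String))) : Prop := out = parse_memcached_alt string_table
instance (string_table : List (List String)) (out : List (String × List (String × String))) : Decidable (Spec_parse_memcached string_table out) := by unfold Spec_parse_memcached; infer_instance

-- ===== CLAIM (what is proved, stated in full; the proofs are below) =====
def Claim_equal_parse_memcached : Prop := ∀ (string_table : List (List String)), Dom_parse_memcached string_table → Pre_parse_memcached string_table → Spec_parse_memcached string_table (parse_memcached string_table)

-- ===== LEMMAS AND PROOFS =====

-- empty lines are skipped by A's loop, so folding over the filtered list is the same
theorem pvFoldA_filter (st : List (List String))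
    (s : PySem.Dict String (PySem.Dict String String) × Option String) :
    st.foldl pvStepA s = (st.filter (fun l => !l.isEmpty)).foldl pvStepA s := by
  induction st generalizing s with
  | nil => rfl
  | cons l t ih =>
    cases l with
    | nil => simpa [pvStepA] using ih s
    | cons w r => simp [List.filter, ih]

-- A's 'instances[cur][k] = v' on a dict whose entry at cur was just (re)written in place
theorem pvModifyInsert (a : PySem.Dict String (PySem.Dict String String)) (k : String)
    (v : PySem.Dict String String) (f : PySem.Dict String String → PySem.Dict String String) :
    PySem.Dict.modify (a.insert k v) k PySem.Dict.empty f = a.insert k (f v) := by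
  simp [PySem.Dict.modify, PySem.Dict.getD_insert_self, PySem.Dict.insert_insert_self]

-- folding A's step over a run of non-empty non-header lines only grows the current instance's dict
theorem pvFoldBody (body : List (List String))
    (hne : ∀ l ∈ body, l ≠ [])
    (hnh : ∀ l ∈ body, PySem.Str.startswith (l.headD "") "[" = false) :
    ∀ (acc : PySem.Dict String (PySem.Dict String String)) (cur : String) (d : PySem.Dict String String),
    body.foldl pvStepA (acc.insert cur d, some cur) =
      (acc.insert cur
        (body.foldl (fun d b => d.insert (b.headD "") (PySem.List.pyGetD b 1 "")) d), some cur) := by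
  induction body with
  | nil => intro acc cur d; rfl
  | cons l t ih =>
    intro acc cur d
    cases l with
    | nil => exact absurd rfl (hne [] (by simp))
    | cons w r =>
      have hh : PySem.Str.startswith w "[" = false := by
        simpa using hnh (w :: r) (by simp)
      simp only [List.foldl_cons, pvStepA, hh, Bool.false_eq_true, if_false]
      rw [pvModifyInsert]
      exact ih (fun l hl => hne l (by simp [hl])) (fun l hl => hnh l (by simp [hl])) acc cur _

theorem pvSegAlt_append (t : List (List String)) :
    (pvSegAlt t).1 ++ (pvSegAlt t).2 = t := by
  induction t with
  | nil => rfl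
  | cons l t ih =>
    simp only [pvSegAlt]
    split
    · rfl
    · simpa using ih

theorem pvSegAlt_body_nonheader (t : List (List String)) :
    ∀ l ∈ (pvSegAlt t).1, PySem.Str.startswith (l.headD "") "[" = false := by
  induction t with
  | nil => simp [pvSegAlt]
  | cons l t ih =>
    by_cases h : PySem.Str.startswith (l.headD "") "[" = true
    · simp only [pvSegAlt, h, if_true]
      simp
    · simp only [pvSegAlt, h, Bool.false_eq_true, if_false]
      intro x hx
      rcases List.mem_cons.mp hx with hxl | hxl
      · subst hxl; simpa using h
      · exact ih x hxl

theorem pvSegAlt_rest_header (t : List (List String)) :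
    ∀ l t', (pvSegAlt t).2 = l :: t' → PySem.Str.startswith (l.headD "") "[" = true := by
  induction t with
  | nil => simp [pvSegAlt]
  | cons l t ih =>
    simp only [pvSegAlt]
    split
    · intro x t' hx
      cases hx
      assumption
    · exact ih

-- Source B's dict comprehension as a fold of inserts
theorem pvOfList_foldl (ps : List (String × String)) :
    PySem.Dict.ofList ps =
      ps.foldl (fun d p => d.insert p.1 p.2) (PySem.Dict.empty : PySem.Dict String String) := by
  simp [PySem.Dict.ofList, PySem.Dict.update]

-- the main invariant: right after A has processed a header naming `cur`, the rest of A's loop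
-- computes exactly B's segment-by-segment construction
theorem pvMain : ∀ (n : Nat) (lines : List (List String)), lines.length ≤ n →
    (∀ l ∈ lines, l ≠ []) →
    ∀ (acc : PySem.Dict String (PySem.Dict String String)) (cur : String),
    (lines.foldl pvStepA (acc.insert cur PySem.Dict.empty, some cur)).1 =
      pvBuildAlt (pvSegAlt lines).2
        (acc.insert cur
          (PySem.Dict.ofList ((pvSegAlt lines).1.map (fun b => (b.headD "", PySem.List.pyGetD b 1 ""))))) := by
  intro n
  induction n with
  | zero =>
    intro lines hlen _ acc cur
    have : lines = [] := List.eq_nil_of_length_eq_zero (Nat.le_zero.mp hlen)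
    subst this
    simp [pvSegAlt, pvBuildAlt, pvOfList_foldl]
  | succ m ih =>
    intro lines hlen hne acc cur
    have hsplit := pvSegAlt_append lines
    have hbodyne : ∀ l ∈ (pvSegAlt lines).1, l ≠ [] := by
      intro l hl; exact hne l (by rw [← hsplit]; exact List.mem_append_left _ hl)
    have hbodynh := pvSegAlt_body_nonheader lines
    -- fold over lines = body ++ rest
    conv_lhs => rw [← hsplit]
    rw [List.foldl_append,
        pvFoldBody (pvSegAlt lines).1 hbodyne hbodynh acc cur PySem.Dict.empty]
    rw [pvOfList_foldl, List.foldl_map]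
    cases hrest : (pvSegAlt lines).2 with
    | nil => simp [pvBuildAlt]
    | cons r t =>
      have hrh := pvSegAlt_rest_header lines r t hrest
      have hrmem : r ∈ lines := by
        rw [← hsplit, hrest]; exact List.mem_append_right _ (by simp)
      cases hr : r with
      | nil => exact absurd hr (hne r hrmem)
      | cons w ws =>
        have hw : PySem.Str.startswith w "[" = true := by
          rw [hr] at hrh; simpa using hrh
        simp only [List.foldl_cons, pvStepA, hw, if_true]
        have htlen : t.length ≤ m := by
          have h1 : (pvSegAlt lines).2.length ≤ lines.length := pvSegAlt_snd_length_le lines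
          rw [hrest] at h1
          simp only [List.length_cons] at h1
          omega
        have htne : ∀ l ∈ t, l ≠ [] := by
          intro l hl
          exact hne l (by rw [← hsplit, hrest]; exact List.mem_append_right _ (by simp [hl]))
        rw [ih t htlen htne _ (PySem.Str.stripChars w "[]")]
        -- unfold one step of pvBuildAlt on the B side
        conv_rhs => rw [pvBuildAlt]
        simp [pvOfList_foldl, List.foldl_map]

-- ===== VERDICT (by name: the statement is the Claim_ definition above) =====
theorem parse_memcached_spec : Claim_equal_parse_memcached := by
  unfold Claim_equal_parse_memcached
  intro st _ hpre
  unfold Spec_parse_memcached parse_memcached parse_memcached_alt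
  rw [pvFoldA_filter]
  unfold Pre_parse_memcached at hpre
  simp only [Bool.and_eq_true] at hpre
  obtain ⟨hhead, _⟩ := hpre
  have hne : ∀ l ∈ st.filter (fun l => !l.isEmpty), l ≠ [] := by
    intro l hl
    have := List.of_mem_filter hl
    simpa [List.isEmpty_iff] using this
  cases hls : st.filter (fun l => !l.isEmpty) with
  | nil => simp [pvBuildAlt]
  | cons l t =>
    have hlne : l ≠ [] := hne l (by rw [hls]; simp)
    cases hl : l with
    | nil => exact absurd hl hlne
    | cons w ws =>
      have hw : PySem.Str.startswith w "[" = true := by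
        rw [hls, hl] at hhead
        simpa using hhead
      simp only [List.foldl_cons, pvStepA, hw, if_true]
      have htne : ∀ x ∈ t, x ≠ [] := by
        intro x hx; exact hne x (by rw [hls]; simp [hx])
      rw [pvMain t.length t le_rfl htne PySem.Dict.empty (PySem.Str.stripChars w "[]")]
      conv_rhs => rw [pvBuildAlt]
      simp
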